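-- pv_equiv track=rewrite | github.com/matheusfonseca18/Abreviador | abreviar.py | abreviar
-- ===== SOURCE A (Python) =====
-- def abreviar(palavra):
--     vogais = "AEIOU"
--     n = len(palavra)
--
--     for i in range(n-1, -1, -1):
--         letra = palavra[i]
--         if letra not in vogais and any(ch in vogais for ch in palavra[i+1:]):
--             return palavra[:i+1]
--
--     for i in range(n-2, -1, -1):
--         if palavra[i] not in vogais:
--             return palavra[:i+1]
--
--     return palavra
-- ===== SOURCE B (Python) =====
-- def abreviar(palavra):
--     vogais = "AEIOU"
--     n = len(palavra)
--     seen_vowel = False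
--     fallback = -1
--     for i in range(n - 1, -1, -1):
--         ch = palavra[i]
--         if ch in vogais:
--             seen_vowel = True
--         elif seen_vowel:
--             return palavra[:i+1]
--         elif fallback == -1 and i <= n - 2:
--             fallback = i
--     return palavra[:fallback+1] if fallback != -1 else palavra
-- ===== Notes on version B (the rewrite author's own statement) =====
-- stated objective: faster
-- what changed: Replaces A's two full scans, each of which rescans the whole remaining suffix looking for a vowel, by a single right-to-left pass that tracks a seen-vowel flag and records the fallback cut position on the fly.
import Mathlib
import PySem

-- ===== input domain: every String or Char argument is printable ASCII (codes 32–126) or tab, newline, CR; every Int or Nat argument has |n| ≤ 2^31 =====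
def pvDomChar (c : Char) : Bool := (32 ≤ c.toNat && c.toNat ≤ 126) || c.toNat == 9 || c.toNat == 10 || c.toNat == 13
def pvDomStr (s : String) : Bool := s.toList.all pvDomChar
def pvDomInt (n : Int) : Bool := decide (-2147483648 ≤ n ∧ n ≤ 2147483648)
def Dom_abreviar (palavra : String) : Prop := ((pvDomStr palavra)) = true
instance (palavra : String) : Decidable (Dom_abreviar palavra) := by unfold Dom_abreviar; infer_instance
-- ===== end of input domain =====

-- B replaces A's two full scans (each rescanning the whole suffix for a vowel) by one
-- right-to-left pass with a seen-vowel flag and an on-the-fly fallback position.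

-- ===== PORT A =====
-- vogais = "AEIOU"
def pvVogais : List Char := "AEIOU".toList

-- 'ch in vogais' for a single character ch
def pvEhVogal (c : Char) : Bool := PySem.Chars.isIn [c] pvVogais

-- first loop: for i in range(n-1, -1, -1): return palavra[:i+1] on the compound test
def abreviarLoop1 (l : List Char) : List Int → Option (List Char)
  | [] => none
  | i :: rest =>
    let letra := PySem.List.pyGetD l i ' '          -- palavra[i]; i is always in range here
    if !(pvEhVogal letra) && (PySem.List.slice l (some (i+1)) none).any pvEhVogal then
      some (PySem.List.slice l none (some (i+1)))
    else abreviarLoop1 l rest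

-- second loop: for i in range(n-2, -1, -1): return palavra[:i+1] if palavra[i] not in vogais
def abreviarLoop2 (l : List Char) : List Int → Option (List Char)
  | [] => none
  | i :: rest =>
    if !(pvEhVogal (PySem.List.pyGetD l i ' ')) then
      some (PySem.List.slice l none (some (i+1)))
    else abreviarLoop2 l rest

def abreviar (palavra : String) : String :=
  let l := palavra.toList
  let n : Int := l.length
  match abreviarLoop1 l (PySem.List.pyRange (n-1) (-1) (-1)) with
  | some r => String.ofList r
  | none =>
    match abreviarLoop2 l (PySem.List.pyRange (n-2) (-1) (-1)) with
    | some r => String.ofList r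
    | none => palavra

-- ===== PORT B =====
-- single right-to-left pass with state (seen_vowel, fallback)
def abreviarAltLoop (l : List Char) : List Int → Bool → Int → List Char
  | [], _seen, fb =>
    if fb != -1 then PySem.List.slice l none (some (fb+1)) else l
  | i :: rest, seen, fb =>
    let ch := PySem.List.pyGetD l i ' '             -- palavra[i]; i is always in range here
    if pvEhVogal ch then
      abreviarAltLoop l rest true fb
    else if seen then
      PySem.List.slice l none (some (i+1))
    else
      abreviarAltLoop l rest seen
        (if fb == -1 && decide (i ≤ (l.length : Int) - 2) then i else fb)

def abreviar_alt (palavra : String) : String :=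
  let l := palavra.toList
  let n : Int := l.length
  String.ofList (abreviarAltLoop l (PySem.List.pyRange (n-1) (-1) (-1)) false (-1))

-- ===== PRECONDITION & SPEC =====
def Spec_abreviar (palavra : String) (out : String) : Prop := out = abreviar_alt palavra
instance (palavra : String) (out : String) : Decidable (Spec_abreviar palavra out) := by unfold Spec_abreviar; infer_instance

-- ===== CLAIM (what is proved, stated in full; the proofs are below) =====
def Claim_equal_abreviar : Prop := ∀ (palavra : String), Dom_abreviar palavra → Spec_abreviar palavra (abreviar palavra)

-- ===== LEMMAS AND PROOFS =====

-- loop1's test at index j, as a predicate on the index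
def pvP (l : List Char) (j : Int) : Bool :=
  !(pvEhVogal (PySem.List.pyGetD l j ' ')) && (PySem.List.slice l (some (j+1)) none).any pvEhVogal

-- loop2's test at index j
def pvQ (l : List Char) (j : Int) : Bool :=
  !(pvEhVogal (PySem.List.pyGetD l j ' '))

theorem abreviarLoop1_eq_find (l : List Char) (r : List Int) :
    abreviarLoop1 l r = (r.find? (pvP l)).map (fun j => PySem.List.slice l none (some (j+1))) := by
  induction r with
  | nil => rfl
  | cons i rest ih =>
    simp only [abreviarLoop1, List.find?, pvP]
    by_cases h : (!(pvEhVogal (PySem.List.pyGetD l i ' ')) && (PySem.List.slice l (some (i+1)) none).any pvEhVogal) = true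
    · simp [h]
    · simp [h, ih]

theorem abreviarLoop2_eq_find (l : List Char) (r : List Int) :
    abreviarLoop2 l r = (r.find? (pvQ l)).map (fun j => PySem.List.slice l none (some (j+1))) := by
  induction r with
  | nil => rfl
  | cons i rest ih =>
    simp only [abreviarLoop2, List.find?, pvQ]
    by_cases h : (!(pvEhVogal (PySem.List.pyGetD l i ' '))) = true
    · simp [h]
    · simp [h, ih]

-- the closed form B's loop computes, phrased with A's two find?s
def pvF (l : List Char) (i : Int) (fb : Int) : List Char :=
  match (PySem.List.pyRange i (-1) (-1)).find? (pvP l) with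
  | some j => PySem.List.slice l none (some (j+1))
  | none =>
    if fb ≠ -1 then PySem.List.slice l none (some (fb+1))
    else
      match (PySem.List.pyRange (min i ((l.length : Int) - 2)) (-1) (-1)).find? (pvQ l) with
      | some j => PySem.List.slice l none (some (j+1))
      | none => l

theorem main_loop_lemma (l : List Char) :
    ∀ (k : Nat) (fb : Int), (k : Int) ≤ (l.length : Int) →
      abreviarAltLoop l (PySem.List.pyRange ((k : Int) - 1) (-1) (-1))
        ((l.drop k).any pvEhVogal) fb = pvF l ((k : Int) - 1) fb := by
  intro k
  induction k with
  | zero =>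
    intro fb _
    rw [PySem.List.pyRange_neg_one_eq_nil (by omega)]
    simp only [abreviarAltLoop, pvF]
    rw [PySem.List.pyRange_neg_one_eq_nil (by omega)]
    simp only [List.find?]
    by_cases h : fb = -1 <;> simp [h]
  | succ k ih =>
    intro fb hk
    have hk' : k < l.length := by omega
    have hidx : ((k + 1 : Nat) : Int) - 1 = (k : Int) := by push_cast; ring
    rw [hidx, PySem.List.pyRange_neg_one_cons (by omega)]
    have hget : PySem.List.pyGetD l (k : Int) ' ' = l[k] := by
      have h := PySem.List.pyGetD_eq_getElem (xs := l) (i := (k : Int)) (d := ' ') (by omega) (by exact_mod_cast hk')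
      simpa using h
    have hslice : PySem.List.slice l (some ((k : Int) + 1)) none = l.drop (k + 1) := by
      have := PySem.List.slice_from (xs := l) (a := (k : Int) + 1) (by omega)
      rw [this]; norm_num
    have hdrop : l.drop k = l[k] :: l.drop (k + 1) := (List.getElem_cons_drop ..).symm
    have hany : (l.drop k).any pvEhVogal = (pvEhVogal l[k] || (l.drop (k + 1)).any pvEhVogal) := by
      rw [hdrop, List.any_cons]
    simp only [abreviarAltLoop, hget]
    by_cases hv : pvEhVogal l[k] = true
    · -- vowel at k: state seen becomes true, fb unchanged
      rw [if_pos hv]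
      have htrue : (true : Bool) = (l.drop k).any pvEhVogal := by rw [hany, hv]; simp
      rw [htrue]
      have := ih fb (by omega)
      rw [this]
      -- pvF l (k-1) fb = pvF l k fb since pvP/pvQ fail at k
      unfold pvF
      rw [PySem.List.pyRange_neg_one_cons (a := (k : Int)) (by omega)]
      simp only [List.find?, pvP, hget, hv, Bool.not_true, Bool.false_and]
      by_cases hko : (k : Int) ≤ (l.length : Int) - 2
      · have h1 : min ((k : Int)) ((l.length : Int) - 2) = (k : Int) := min_eq_left hko
        have h2 : min ((k : Int) - 1) ((l.length : Int) - 2) = (k : Int) - 1 := min_eq_left (by omega)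
        have hQ : pvQ l (k : Int) = false := by simp [pvQ, hget, hv]
        rw [h1, h2, PySem.List.pyRange_neg_one_cons (show (-1 : Int) < (k : Int) by omega)]
        simp [List.find?, hQ]
      · have h1 : min ((k : Int)) ((l.length : Int) - 2) = (l.length : Int) - 2 := by omega
        have h2 : min ((k : Int) - 1) ((l.length : Int) - 2) = (l.length : Int) - 2 := by omega
        rw [h1, h2]
    · rw [if_neg hv]
      have hseen : (l.drop k).any pvEhVogal = (l.drop (k + 1)).any pvEhVogal := by
        rw [hany]; simp [hv]
      by_cases hs : (l.drop (k + 1)).any pvEhVogal = true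
      · -- consonant with a vowel seen: both return the cut at k+1
        rw [if_pos hs]
        unfold pvF
        rw [PySem.List.pyRange_neg_one_cons (a := (k : Int)) (by omega)]
        have hP : pvP l (k : Int) = true := by
          simp [pvP, hget, hv, hslice, hs]
        simp [List.find?, hP]
      · -- consonant, no vowel seen yet: fb may be updated
        rw [if_neg hs]
        have e1 : (l.drop (k + 1)).any pvEhVogal = false := by simpa using hs
        have e2 : (l.drop k).any pvEhVogal = false := by rw [hany, e1]; simp [hv]
        rw [e1, ← e2]
        set fb' : Int := if fb == -1 && decide ((k : Int) ≤ (l.length : Int) - 2) then (k : Int) else fb with hfb'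
        have := ih fb' (by omega)
        rw [this]
        -- pvF l (k-1) fb' = pvF l k fb
        unfold pvF
        rw [PySem.List.pyRange_neg_one_cons (a := (k : Int)) (by omega)]
        have hP : pvP l (k : Int) = false := by
          simp [pvP, hget, hv, hslice, hs]
        simp only [List.find?, hP]
        cases hfind : (PySem.List.pyRange ((k : Int) - 1) (-1) (-1)).find? (pvP l) with
        | some j => rfl
        | none =>
          by_cases hfb : fb = -1
          · by_cases hko : (k : Int) ≤ (l.length : Int) - 2
            · have hfbe : fb' = (k : Int) := by simp [hfb', hfb, hko]
              have h1 : min ((k : Int)) ((l.length : Int) - 2) = (k : Int) := min_eq_left hko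
              have hQ : pvQ l (k : Int) = true := by simp [pvQ, hget, hv]
              rw [hfbe, h1, PySem.List.pyRange_neg_one_cons (show (-1 : Int) < (k : Int) by omega)]
              simp [List.find?, hQ, hfb, (show (k : Int) ≠ -1 by omega)]
            · have hfbe : fb' = fb := by simp [hfb', hko]
              have h1 : min ((k : Int)) ((l.length : Int) - 2) = (l.length : Int) - 2 := by omega
              have h2 : min ((k : Int) - 1) ((l.length : Int) - 2) = (l.length : Int) - 2 := by omega
              rw [hfbe, h1, h2]
          · have hfbe : fb' = fb := by simp [hfb', hfb]
            rw [hfbe]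
            simp [hfb]

theorem abreviar_spec' (palavra : String) : abreviar palavra = abreviar_alt palavra := by
  unfold abreviar abreviar_alt
  simp only []
  set l := palavra.toList with hl
  have hmain := main_loop_lemma l l.length (-1) (by omega)
  have hdrop : (l.drop l.length).any pvEhVogal = false := by simp
  rw [hdrop] at hmain
  have hn : ((l.length : Int) - 1) = ((l.length : Nat) : Int) - 1 := rfl
  rw [hmain]
  unfold pvF
  rw [abreviarLoop1_eq_find, abreviarLoop2_eq_find]
  have hmin : min ((l.length : Int) - 1) ((l.length : Int) - 2) = (l.length : Int) - 2 := by omega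
  rw [hmin]
  cases h1 : (PySem.List.pyRange ((l.length : Int) - 1) (-1) (-1)).find? (pvP l) with
  | some j => simp
  | none =>
    simp only [Option.map_none]
    rw [if_neg (by simp : ¬ (-1 : Int) ≠ -1)]
    cases h2 : (PySem.List.pyRange ((l.length : Int) - 2) (-1) (-1)).find? (pvQ l) with
    | some j => simp
    | none => simp [hl]

-- ===== VERDICT (by name: the statement is the Claim_ definition above) =====
theorem abreviar_spec : Claim_equal_abreviar := by
  intro palavra _
  unfold Spec_abreviar
  exact abreviar_spec' palavra
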